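-- pv_equiv track=rewrite | github.com/g1tsys/coding | Day 3 - Score 100/407-land_allocation.py | calculate_largest_area
-- ===== SOURCE A (Python) =====
-- def calculate_largest_area(m, n, grid):
--     # 创建一个字典来存储每个数字旗子的最小矩阵边界
--     flags = {}
--     for i in range(m):
--         for j in range(n):
--             flag = grid[i][j]
--             # 如果当前位置有旗子
--             if flag != 0:
--                 # 如果旗子是第一次出现，初始化其边界
--                 if flag not in flags:
--                     flags[flag] = {'min_x': i, 'max_x': i, 'min_y': j, 'max_y': j}
--                 else:
--                     # 更新旗子的边界
--                     flags[flag]['min_x'] = min(flags[flag]['min_x'], i)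
--                     flags[flag]['max_x'] = max(flags[flag]['max_x'], i)
--                     flags[flag]['min_y'] = min(flags[flag]['min_y'], j)
--                     flags[flag]['max_y'] = max(flags[flag]['max_y'], j)
--
--     # 遍历所有旗子，计算它们的最小覆盖矩阵面积，并找到最大值
--     max_area = 0
--     for flag, coords in flags.items():
--         area = (coords['max_x'] - coords['min_x'] + 1) * (coords['max_y'] - coords['min_y'] + 1)
--         max_area = max(max_area, area)
--
--     # 如果没有旗子，则返回0
--     return max_area
-- ===== SOURCE B (Python) =====
-- def calculate_largest_area(m, n, grid):
--     # Gather-then-reduce: first pass collects every nonzero cell's coordinates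
--     # per flag; second pass reduces each coordinate list with min/max.
--     coords = {}
--     for i in range(m):
--         for j in range(n):
--             v = grid[i][j]
--             if v != 0:
--                 coords.setdefault(v, []).append((i, j))
--     best = 0
--     for pts in coords.values():
--         xs = [p[0] for p in pts]
--         ys = [p[1] for p in pts]
--         best = max(best, (max(xs) - min(xs) + 1) * (max(ys) - min(ys) + 1))
--     return best
-- ===== Notes on version B (the rewrite author's own statement) =====
-- stated objective: alternative
-- what changed: A maintains running min/max bounds per flag inside the grid scan; B only gathers each flag's coordinate list in the scan and computes the min/max extents and areas in a separate reduce pass over the grouped table.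
import Mathlib
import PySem

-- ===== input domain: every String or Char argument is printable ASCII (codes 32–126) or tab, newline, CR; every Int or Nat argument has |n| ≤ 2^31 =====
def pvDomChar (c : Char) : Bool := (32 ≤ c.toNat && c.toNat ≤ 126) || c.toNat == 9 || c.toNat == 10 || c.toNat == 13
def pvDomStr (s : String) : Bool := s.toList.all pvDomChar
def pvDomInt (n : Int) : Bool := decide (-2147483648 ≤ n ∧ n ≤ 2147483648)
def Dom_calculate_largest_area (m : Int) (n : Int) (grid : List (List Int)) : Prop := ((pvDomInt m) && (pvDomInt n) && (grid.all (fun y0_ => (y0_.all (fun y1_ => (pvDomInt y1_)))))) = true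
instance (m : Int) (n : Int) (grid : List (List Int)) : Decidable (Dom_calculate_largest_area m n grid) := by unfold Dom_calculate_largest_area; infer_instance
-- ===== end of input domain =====

-- B replaces A's running per-flag min/max bookkeeping inside the grid scan by a
-- gather pass (flag -> list of coordinates) followed by a separate min/max reduce
-- pass; same O(m*n) cost, a different decomposition (objective: alternative).

-- ===== PORT A =====
-- Python's inner dict {'min_x','max_x','min_y','max_y'} is represented as the
-- 4-tuple (min_x, max_x, min_y, max_y); grid[i][j] is pyGetD (in range under Pre_).
def calculate_largest_area (m : Int) (n : Int) (grid : List (List Int)) : Int :=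
  let flags : PySem.Dict Int (Int × Int × Int × Int) :=
    (PySem.List.pyRange 0 m 1).foldl (fun d i =>
      (PySem.List.pyRange 0 n 1).foldl (fun d j =>
        let flag := PySem.List.pyGetD (PySem.List.pyGetD grid i []) j 0
        if flag ≠ 0 then
          if d.contains flag = false then
            d.insert flag (i, i, j, j)
          else
            let b := d.getD flag (0, 0, 0, 0)
            d.insert flag (min b.1 i, max b.2.1 i, min b.2.2.1 j, max b.2.2.2 j)
        else d) d) PySem.Dict.empty
  flags.items.foldl (fun max_area p =>
    max max_area ((p.2.2.1 - p.2.1 + 1) * (p.2.2.2.2 - p.2.2.2.1 + 1))) 0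

-- ===== PORT B =====
-- coords.setdefault(v, []).append((i, j)) is Dict.modify v [] (· ++ [(i, j)]);
-- min(xs)/max(xs) are minD/maxD with default 0 (the lists are never empty).
def calculate_largest_area_alt (m : Int) (n : Int) (grid : List (List Int)) : Int :=
  let coords : PySem.Dict Int (List (Int × Int)) :=
    (PySem.List.pyRange 0 m 1).foldl (fun d i =>
      (PySem.List.pyRange 0 n 1).foldl (fun d j =>
        let v := PySem.List.pyGetD (PySem.List.pyGetD grid i []) j 0
        if v ≠ 0 then d.modify v [] (fun pts => pts ++ [(i, j)]) else d) d)
      PySem.Dict.empty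
  coords.values.foldl (fun best pts =>
    let xs := pts.map (fun p => p.1)
    let ys := pts.map (fun p => p.2)
    max best ((PySem.List.maxD xs (fun a => a) 0 - PySem.List.minD xs (fun a => a) 0 + 1) *
              (PySem.List.maxD ys (fun a => a) 0 - PySem.List.minD ys (fun a => a) 0 + 1))) 0

-- ===== PRECONDITION & SPEC =====
-- Pre_ excludes exactly the inputs where Python A raises IndexError: when the
-- column loop runs (0 < n), every visited row index must exist and be ≥ n wide.
def Pre_calculate_largest_area (m : Int) (n : Int) (grid : List (List Int)) : Prop :=
  0 < n → (m ≤ (grid.length : Int) ∧ ∀ row ∈ grid.take m.toNat, n ≤ (row.length : Int))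
instance (m : Int) (n : Int) (grid : List (List Int)) : Decidable (Pre_calculate_largest_area m n grid) := by unfold Pre_calculate_largest_area; infer_instance

def pvWitness_calculate_largest_area : Int × Int × List (List Int) := (2, 2, [[1, 0], [0, 1]])

def Spec_calculate_largest_area (m : Int) (n : Int) (grid : List (List Int)) (out : Int) : Prop := out = calculate_largest_area_alt m n grid
instance (m : Int) (n : Int) (grid : List (List Int)) (out : Int) : Decidable (Spec_calculate_largest_area m n grid out) := by unfold Spec_calculate_largest_area; infer_instance

-- ===== CLAIM (what is proved, stated in full; the proofs are below) =====
def Claim_equal_calculate_largest_area : Prop := ∀ (m : Int) (n : Int) (grid : List (List Int)), Dom_calculate_largest_area m n grid → Pre_calculate_largest_area m n grid → Spec_calculate_largest_area m n grid (calculate_largest_area m n grid)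

-- ===== LEMMAS AND PROOFS =====

-- bounds of a coordinate list, as the incremental fold A would compute
def pvBounds (pts : List (Int × Int)) : Int × Int × Int × Int :=
  match pts with
  | [] => (0, 0, 0, 0)
  | p :: ps => ps.foldl (fun t q => (min t.1 q.1, max t.2.1 q.1, min t.2.2.1 q.2, max t.2.2.2 q.2))
      (p.1, p.1, p.2, p.2)

def pvMapVal (c : PySem.Dict Int (List (Int × Int))) : PySem.Dict Int (Int × Int × Int × Int) :=
  PySem.Dict.mk (c.items.map (fun p => (p.1, pvBounds p.2)))

def pvP (c : PySem.Dict Int (List (Int × Int))) : Prop := ∀ p ∈ c.items, p.2 ≠ []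

lemma pvBounds_append (pts : List (Int × Int)) (h : pts ≠ []) (q : Int × Int) :
    pvBounds (pts ++ [q]) =
      ((min (pvBounds pts).1 q.1, max (pvBounds pts).2.1 q.1,
        min (pvBounds pts).2.2.1 q.2, max (pvBounds pts).2.2.2 q.2)) := by
  cases pts with
  | nil => exact absurd rfl h
  | cons p ps => simp [pvBounds, List.foldl_append]

lemma pvGet?_mapVal (c : PySem.Dict Int (List (Int × Int))) (k : Int) :
    (pvMapVal c).get? k = (c.get? k).map pvBounds := by
  simp [pvMapVal, PySem.Dict.get?, Option.map_map]
  rfl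

lemma pvContains_mapVal (c : PySem.Dict Int (List (Int × Int))) (k : Int) :
    (pvMapVal c).contains k = c.contains k := by
  simp [pvMapVal, PySem.Dict.contains, List.any_map]
  rfl

lemma pvMapVal_insert (c : PySem.Dict Int (List (Int × Int))) (k : Int) (pts : List (Int × Int)) :
    pvMapVal (c.insert k pts) = (pvMapVal c).insert k (pvBounds pts) := by
  by_cases h : c.contains k = true
  · simp only [PySem.Dict.insert, h, pvContains_mapVal, if_pos]
    simp only [pvMapVal, List.map_map]
    congr 1
    apply List.map_congr_left
    intro p _
    by_cases hp : p.1 = k <;> simp [hp]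
  · simp only [PySem.Dict.insert, pvContains_mapVal, if_neg h]
    simp [pvMapVal]

-- one grid cell: A's incremental update commutes with B's gathering update
lemma pvCell_step (c : PySem.Dict Int (List (Int × Int))) (hP : pvP c) (v i j : Int) :
    ((if v ≠ 0 then
        if (pvMapVal c).contains v = false then
          (pvMapVal c).insert v (i, i, j, j)
        else
          let b := (pvMapVal c).getD v (0, 0, 0, 0)
          (pvMapVal c).insert v (min b.1 i, max b.2.1 i, min b.2.2.1 j, max b.2.2.2 j)
      else pvMapVal c)
      = pvMapVal (if v ≠ 0 then c.modify v [] (fun pts => pts ++ [(i, j)]) else c))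
    ∧ pvP (if v ≠ 0 then c.modify v [] (fun pts => pts ++ [(i, j)]) else c) := by
  by_cases hv : v = 0
  · subst hv
    constructor
    · rw [if_neg (by decide), if_neg (by decide)]
    · rw [if_neg (by decide : ¬ ((0:Int) ≠ 0))]; exact hP
  · simp only [hv, ne_eq, not_false_eq_true, if_pos]
    have hmod : c.modify v [] (fun pts => pts ++ [(i, j)])
        = c.insert v (c.getD v [] ++ [(i, j)]) := rfl
    have hPnew : pvP (c.modify v [] (fun pts => pts ++ [(i, j)])) := by
      rw [hmod]
      intro p hp
      rcases (PySem.Dict.mem_items_insert _ _ _ _).1 hp with h1 | h2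
      · subst h1; simp
      · exact hP p h2.1
    refine ⟨?_, hPnew⟩
    by_cases hc : c.contains v = true
    · -- key already present: B appends to the existing list
      have hsome : ∃ pts, c.get? v = some pts := by
        have := PySem.Dict.contains_eq_isSome_get? (d := c) (k := v)
        rw [hc] at this
        exact Option.isSome_iff_exists.1 this.symm
      obtain ⟨pts, hpts⟩ := hsome
      have hne : pts ≠ [] := hP (v, pts) (PySem.Dict.mem_items_of_get?_eq_some c hpts)
      have hgd : c.getD v [] = pts := PySem.Dict.getD_of_get?_eq_some c [] hpts
      have hgdA : (pvMapVal c).getD v (0, 0, 0, 0) = pvBounds pts := by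
        simp [PySem.Dict.getD, pvGet?_mapVal, hpts]
      rw [hmod, pvMapVal_insert, pvContains_mapVal, hc, hgd,
        pvBounds_append pts hne (i, j), hgdA]
      simp
    · -- fresh key: both append a new entry
      have hc' : c.contains v = false := by simpa using hc
      have hgd : c.getD v [] = [] := PySem.Dict.getD_of_not_contains c [] hc'
      rw [hmod, pvMapVal_insert, pvContains_mapVal, hc', hgd]
      simp [pvBounds]

-- a fold commutes with pvMapVal as soon as each step does, preserving pvP
lemma pvFoldl_comm {α : Type}
    (fA : PySem.Dict Int (Int × Int × Int × Int) → α → PySem.Dict Int (Int × Int × Int × Int))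
    (fB : PySem.Dict Int (List (Int × Int)) → α → PySem.Dict Int (List (Int × Int)))
    (hstep : ∀ c x, pvP c → fA (pvMapVal c) x = pvMapVal (fB c x) ∧ pvP (fB c x)) :
    ∀ (L : List α) (c), pvP c →
      L.foldl fA (pvMapVal c) = pvMapVal (L.foldl fB c) ∧ pvP (L.foldl fB c) := by
  intro L
  induction L with
  | nil => intro c hc; exact ⟨rfl, hc⟩
  | cons x t ih =>
    intro c hc
    obtain ⟨h1, h2⟩ := hstep c x hc
    simpa [List.foldl_cons, h1] using ih (fB c x) h2

-- Python min of a nonempty Int list is foldl min, Python max is foldl max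
lemma pvMin?_cons (s : List Int) : ∀ x : Int,
    PySem.List.min? (x :: s) (fun a => a) = some (s.foldl min x) := by
  induction s with
  | nil => intro x; rfl
  | cons y s ih =>
    intro x
    rcases lt_or_ge y x with h | h
    · have key : PySem.List.min? (x :: y :: s) (fun a => a)
          = PySem.List.min? (y :: s) (fun a => a) := by
        simp only [PySem.List.min?, List.foldl_cons]
        congr 1
        show (if y < x then some y else some x) = some y
        rw [if_pos h]
      rw [key, ih y, List.foldl_cons, min_eq_right (le_of_lt h)]
    · have key : PySem.List.min? (x :: y :: s) (fun a => a)
          = PySem.List.min? (x :: s) (fun a => a) := by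
        simp only [PySem.List.min?, List.foldl_cons]
        congr 1
        show (if y < x then some y else some x) = some x
        rw [if_neg (not_lt.mpr h)]
      rw [key, ih x, List.foldl_cons, min_eq_left h]

lemma pvMax?_cons (s : List Int) : ∀ x : Int,
    PySem.List.max? (x :: s) (fun a => a) = some (s.foldl max x) := by
  induction s with
  | nil => intro x; rfl
  | cons y s ih =>
    intro x
    rcases lt_or_ge x y with h | h
    · have key : PySem.List.max? (x :: y :: s) (fun a => a)
          = PySem.List.max? (y :: s) (fun a => a) := by
        simp only [PySem.List.max?, List.foldl_cons]
        congr 1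
        show (if x < y then some y else some x) = some y
        rw [if_pos h]
      rw [key, ih y, List.foldl_cons, max_eq_right (le_of_lt h)]
    · have key : PySem.List.max? (x :: y :: s) (fun a => a)
          = PySem.List.max? (x :: s) (fun a => a) := by
        simp only [PySem.List.max?, List.foldl_cons]
        congr 1
        show (if x < y then some y else some x) = some x
        rw [if_neg (not_lt.mpr h)]
      rw [key, ih x, List.foldl_cons, max_eq_left h]

lemma pvMinD_cons (x : Int) (t : List Int) :
    PySem.List.minD (x :: t) (fun a => a) 0 = t.foldl min x := by
  simp only [PySem.List.minD, pvMin?_cons]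
  rfl

lemma pvMaxD_cons (x : Int) (t : List Int) :
    PySem.List.maxD (x :: t) (fun a => a) 0 = t.foldl max x := by
  simp only [PySem.List.maxD, pvMax?_cons]
  rfl

lemma pvBounds_foldl (ps : List (Int × Int)) (a b c e : Int) :
    ps.foldl (fun t q => (min t.1 q.1, max t.2.1 q.1, min t.2.2.1 q.2, max t.2.2.2 q.2))
        (a, b, c, e)
      = ((ps.map (fun p => p.1)).foldl min a, (ps.map (fun p => p.1)).foldl max b,
         (ps.map (fun p => p.2)).foldl min c, (ps.map (fun p => p.2)).foldl max e) := by
  induction ps generalizing a b c e with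
  | nil => rfl
  | cons q t ih => simp [List.foldl_cons, ih]

lemma pvBounds_eq_minmax (pts : List (Int × Int)) (h : pts ≠ []) :
    pvBounds pts
      = (PySem.List.minD (pts.map (fun p => p.1)) (fun a => a) 0,
         PySem.List.maxD (pts.map (fun p => p.1)) (fun a => a) 0,
         PySem.List.minD (pts.map (fun p => p.2)) (fun a => a) 0,
         PySem.List.maxD (pts.map (fun p => p.2)) (fun a => a) 0) := by
  cases pts with
  | nil => exact absurd rfl h
  | cons p ps =>
    simp only [pvBounds, List.map_cons, pvMinD_cons, pvMaxD_cons, pvBounds_foldl]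

-- ===== VERDICT (by name: the statement is the Claim_ definition above) =====
theorem calculate_largest_area_spec : Claim_equal_calculate_largest_area := by
  intro m n grid _ _
  unfold Spec_calculate_largest_area calculate_largest_area calculate_largest_area_alt
  have hstep_row : ∀ (c : PySem.Dict Int (List (Int × Int))) (i : Int), pvP c →
      ((fun (d : PySem.Dict Int (Int × Int × Int × Int)) (i : Int) =>
        (PySem.List.pyRange 0 n 1).foldl (fun d j =>
          let flag := PySem.List.pyGetD (PySem.List.pyGetD grid i []) j 0
          if flag ≠ 0 then
            if d.contains flag = false then d.insert flag (i, i, j, j)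
            else
              let b := d.getD flag (0, 0, 0, 0)
              d.insert flag (min b.1 i, max b.2.1 i, min b.2.2.1 j, max b.2.2.2 j)
          else d) d) (pvMapVal c) i
        = pvMapVal ((fun (d : PySem.Dict Int (List (Int × Int))) (i : Int) =>
          (PySem.List.pyRange 0 n 1).foldl (fun d j =>
            let v := PySem.List.pyGetD (PySem.List.pyGetD grid i []) j 0
            if v ≠ 0 then d.modify v [] (fun pts => pts ++ [(i, j)]) else d) d) c i))
      ∧ pvP ((fun (d : PySem.Dict Int (List (Int × Int))) (i : Int) =>
          (PySem.List.pyRange 0 n 1).foldl (fun d j =>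
            let v := PySem.List.pyGetD (PySem.List.pyGetD grid i []) j 0
            if v ≠ 0 then d.modify v [] (fun pts => pts ++ [(i, j)]) else d) d) c i) := by
    intro c i hc
    exact pvFoldl_comm
      (fun d j =>
        let flag := PySem.List.pyGetD (PySem.List.pyGetD grid i []) j 0
        if flag ≠ 0 then
          if d.contains flag = false then d.insert flag (i, i, j, j)
          else
            let b := d.getD flag (0, 0, 0, 0)
            d.insert flag (min b.1 i, max b.2.1 i, min b.2.2.1 j, max b.2.2.2 j)
        else d)
      (fun d j =>
        let v := PySem.List.pyGetD (PySem.List.pyGetD grid i []) j 0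
        if v ≠ 0 then d.modify v [] (fun pts => pts ++ [(i, j)]) else d)
      (fun c j hc => pvCell_step c hc (PySem.List.pyGetD (PySem.List.pyGetD grid i []) j 0) i j)
      (PySem.List.pyRange 0 n 1) c hc
  have hmain := pvFoldl_comm
      (fun (d : PySem.Dict Int (Int × Int × Int × Int)) (i : Int) =>
        (PySem.List.pyRange 0 n 1).foldl (fun d j =>
          let flag := PySem.List.pyGetD (PySem.List.pyGetD grid i []) j 0
          if flag ≠ 0 then
            if d.contains flag = false then d.insert flag (i, i, j, j)
            else
              let b := d.getD flag (0, 0, 0, 0)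
              d.insert flag (min b.1 i, max b.2.1 i, min b.2.2.1 j, max b.2.2.2 j)
          else d) d)
      (fun (d : PySem.Dict Int (List (Int × Int))) (i : Int) =>
        (PySem.List.pyRange 0 n 1).foldl (fun d j =>
          let v := PySem.List.pyGetD (PySem.List.pyGetD grid i []) j 0
          if v ≠ 0 then d.modify v [] (fun pts => pts ++ [(i, j)]) else d) d)
      hstep_row (PySem.List.pyRange 0 m 1) PySem.Dict.empty
      (by intro p hp; simp [PySem.Dict.empty] at hp)
  obtain ⟨hdict, hPfin⟩ := hmain
  rw [show pvMapVal PySem.Dict.empty = PySem.Dict.empty from rfl] at hdict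
  rw [hdict]
  -- final pass: both reduce the same grouped table, A over its items, B over its values
  generalize hPfin = hPf
  revert hPf
  generalize ((PySem.List.pyRange 0 m 1).foldl (fun (d : PySem.Dict Int (List (Int × Int))) i =>
      (PySem.List.pyRange 0 n 1).foldl (fun d j =>
        let v := PySem.List.pyGetD (PySem.List.pyGetD grid i []) j 0
        if v ≠ 0 then d.modify v [] (fun pts => pts ++ [(i, j)]) else d) d)
      PySem.Dict.empty) = cf
  intro hPf
  show (List.foldl (fun max_area (p : Int × Int × Int × Int × Int) =>
      max max_area ((p.2.2.1 - p.2.1 + 1) * (p.2.2.2.2 - p.2.2.2.1 + 1))) 0 (pvMapVal cf).items)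
    = List.foldl (fun best (pts : List (Int × Int)) =>
        max best ((PySem.List.maxD (pts.map (fun p => p.1)) (fun a => a) 0
                    - PySem.List.minD (pts.map (fun p => p.1)) (fun a => a) 0 + 1) *
                  (PySem.List.maxD (pts.map (fun p => p.2)) (fun a => a) 0
                    - PySem.List.minD (pts.map (fun p => p.2)) (fun a => a) 0 + 1))) 0 cf.values
  have hA : (pvMapVal cf).items = cf.items.map (fun p => (p.1, pvBounds p.2)) := rfl
  have hB : cf.values = cf.items.map (fun p => p.2) := rfl
  rw [hA, hB, List.foldl_map, List.foldl_map]
  apply PySem.List.foldl_congr_mem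
  intro acc p hp
  have hne : p.2 ≠ [] := hPf p hp
  rw [pvBounds_eq_minmax p.2 hne]
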